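-- pv_equiv track=rewrite | github.com/aceventura82/rummi | rummiApp/games.py | removeInitialJokers
-- ===== SOURCE A (Python) =====
-- def removeInitialJokers(cardList):
--     # remove all initials joker
--     i = 0
--     while i < len(cardList):
--         if cardList[i] == 'XX':
--             del cardList[i]
--             i -= 1
--         else:
--             break
--         i += 1
--     return cardList
-- ===== SOURCE B (Python) =====
-- def removeInitialJokers(cardList):
--     # find the boundary of the leading joker run, then delete it in one slice
--     k = 0
--     while k < len(cardList) and cardList[k] == 'XX':
--         k += 1
--     del cardList[:k]
--     return cardList
-- ===== Notes on version B (the rewrite author's own statement) =====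
-- stated objective: simpler
-- what changed: Instead of repeatedly deleting element 0 and rewinding the index inside the loop, B scans forward to find the end k of the leading 'XX' run and removes the whole prefix with one bulk del cardList[:k].
import Mathlib
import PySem

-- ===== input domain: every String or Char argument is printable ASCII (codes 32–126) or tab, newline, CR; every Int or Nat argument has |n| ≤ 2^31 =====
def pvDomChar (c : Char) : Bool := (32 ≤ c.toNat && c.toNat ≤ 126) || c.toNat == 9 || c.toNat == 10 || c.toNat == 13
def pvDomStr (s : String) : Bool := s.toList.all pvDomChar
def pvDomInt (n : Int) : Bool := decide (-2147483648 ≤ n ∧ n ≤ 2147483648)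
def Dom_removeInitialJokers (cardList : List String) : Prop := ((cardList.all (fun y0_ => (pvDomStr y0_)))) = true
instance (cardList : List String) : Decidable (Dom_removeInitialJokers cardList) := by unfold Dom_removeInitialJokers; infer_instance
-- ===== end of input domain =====

-- B removes the leading run of 'XX' with one forward scan and a single bulk
-- prefix deletion instead of A's repeated del cardList[0] with index rewinding
-- (simpler; return value only — both Pythons mutate cardList in place).

-- ===== PORT A =====
-- A's while loop: index i, delete at i and rewind when a joker is seen, else break.
def removeInitialJokersLoop (i : Int) (xs : List String) : List String :=
  if h : 0 ≤ i ∧ i < (xs.length : Int) then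
    if PySem.List.pyGet? xs i = some "XX" then
      -- del cardList[i]; i -= 1; then i += 1 at the loop bottom
      removeInitialJokersLoop (i - 1 + 1) (xs.eraseIdx i.toNat)
    else xs
  else xs
termination_by xs.length
decreasing_by
  have hi : i.toNat < xs.length := by omega
  simp [List.length_eraseIdx, hi]
  omega

def removeInitialJokers (cardList : List String) : List String :=
  removeInitialJokersLoop 0 cardList

-- ===== PORT B =====
-- scan forward for the boundary k of the leading 'XX' run
def jokerRunLen (k : Nat) (xs : List String) : Nat :=
  if h : k < xs.length ∧ xs[k]? = some "XX" then jokerRunLen (k + 1) xs else k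
termination_by xs.length - k

def removeInitialJokers_alt (cardList : List String) : List String :=
  cardList.drop (jokerRunLen 0 cardList)   -- del cardList[:k]

-- ===== PRECONDITION & SPEC =====
def Spec_removeInitialJokers (cardList : List String) (out : List String) : Prop := out = removeInitialJokers_alt cardList
instance (cardList : List String) (out : List String) : Decidable (Spec_removeInitialJokers cardList out) := by unfold Spec_removeInitialJokers; infer_instance

-- ===== CLAIM (what is proved, stated in full; the proofs are below) =====
def Claim_equal_removeInitialJokers : Prop := ∀ (cardList : List String), Dom_removeInitialJokers cardList → Spec_removeInitialJokers cardList (removeInitialJokers cardList)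

-- ===== LEMMAS AND PROOFS =====

theorem le_jokerRunLen (xs : List String) (k : Nat) : k ≤ jokerRunLen k xs := by
  rw [jokerRunLen.eq_def]
  split
  · have := le_jokerRunLen xs (k + 1); omega
  · omega
termination_by xs.length - k
decreasing_by omega

-- A's loop (always re-entered at i = 0) drops leading 'XX' entries.
theorem removeInitialJokersLoop_zero (xs : List String) :
    removeInitialJokersLoop 0 xs = xs.dropWhile (· == "XX") := by
  induction xs with
  | nil => rw [removeInitialJokersLoop.eq_def]; simp
  | cons x xs ih =>
    rw [removeInitialJokersLoop.eq_def]
    by_cases hx : x = "XX"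
    · simpa [hx, PySem.List.pyGet?, PySem.List.pyIdx?, List.dropWhile] using ih
    · have hb : (x == "XX") = false := by simp [hx]
      simp [hx, hb, PySem.List.pyGet?, PySem.List.pyIdx?, List.dropWhile]

-- B's scan counts the leading 'XX' run, so drop of it equals dropWhile.
theorem drop_jokerRunLen (xs : List String) (k : Nat) :
    (xs.drop k).drop (jokerRunLen k xs - k) = (xs.drop k).dropWhile (· == "XX") := by
  by_cases h : k < xs.length ∧ xs[k]? = some "XX"
  · obtain ⟨hk, hx⟩ := h
    have hget : xs[k] = "XX" := by
      have := List.getElem?_eq_getElem hk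
      rw [this] at hx; exact Option.some.inj hx
    have hrun : jokerRunLen k xs = jokerRunLen (k + 1) xs := by
      rw [jokerRunLen.eq_def]; simp [hk, hget]
    have hdrop : xs.drop k = "XX" :: xs.drop (k + 1) := by
      rw [List.drop_eq_getElem_cons hk, hget]
    have hle : k + 1 ≤ jokerRunLen (k + 1) xs := le_jokerRunLen xs (k + 1)
    have ih := drop_jokerRunLen xs (k + 1)
    have harith : jokerRunLen (k + 1) xs - k = (jokerRunLen (k + 1) xs - (k + 1)) + 1 := by
      omega
    rw [hrun, hdrop, harith, List.drop_succ_cons, List.dropWhile_cons]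
    simpa using ih
  · have hrun : jokerRunLen k xs = k := by
      rw [jokerRunLen.eq_def]; simp only [h, dite_false]
    rw [hrun, Nat.sub_self, List.drop_zero]
    rcases Nat.lt_or_ge k xs.length with hk | hk
    · have hne : xs[k] ≠ "XX" := by
        intro hc
        exact h ⟨hk, by rw [List.getElem?_eq_getElem hk, hc]⟩
      rw [List.drop_eq_getElem_cons hk, List.dropWhile_cons]
      simp [hne]
    · simp [List.drop_eq_nil_of_le hk]
termination_by xs.length - k
decreasing_by omega

-- ===== VERDICT (by name: the statement is the Claim_ definition above) =====
theorem removeInitialJokers_spec : Claim_equal_removeInitialJokers := by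
  intro cardList _
  show removeInitialJokers cardList = removeInitialJokers_alt cardList
  have h := drop_jokerRunLen cardList 0
  simp only [List.drop_zero, Nat.sub_zero] at h
  rw [removeInitialJokers, removeInitialJokersLoop_zero, removeInitialJokers_alt, h]
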